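-- pv_equiv track=rewrite | github.com/ARM-software/sbmr-acs | lib/var_funcs.py | split_dict_on_key
-- ===== SOURCE A (Python) =====
-- def split_dict_on_key(split_key, dictionary):
--     r"""
--     Split a dictionary into two dictionaries based on the first occurrence of the split key and return the
--     resulting sub-dictionaries.
--
--     Example:
--     dictionary = {'one': 1, 'two': 2, 'three':3, 'four':4}
--     dict1, dict2 = split_dict_on_key('three', dictionary)
--     pvars(dictionary, dict1, dict2)
--
--     Output:
--     dictionary:
--       [one]:                                          1
--       [two]:                                          2
--       [three]:                                        3
--       [four]:                                         4
--     dict1: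
--       [one]:                                          1
--       [two]:                                          2
--     dict2:
--       [three]:                                        3
--       [four]:                                         4
--
--     Description of argument(s):
--     split_key                       The key value to be used to determine where the dictionary should be
--                                     split.
--     dictionary                      The dictionary to be split.
--     """
--     dict1 = {}
--     dict2 = {}
--     found_split_key = False
--     for key in list(dictionary.keys()):
--         if key == split_key:
--             found_split_key = True
--         if found_split_key:
--             dict2[key] = dictionary[key]
--         else:
--             dict1[key] = dictionary[key]
--     return dict1, dict2
-- ===== SOURCE B (Python) =====
-- def split_dict_on_key(split_key, dictionary):
--     items = list(dictionary.items())
--     i = next((j for j, (k, _v) in enumerate(items) if k == split_key), len(items))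
--     return dict(items[:i]), dict(items[i:])
-- ===== Notes on version B (the rewrite author's own statement) =====
-- stated objective: simpler
-- what changed: Replaces the flag-driven single pass that appends into two dicts with finding the first index of split_key and splitting the item list into two slices there (everything goes to dict1 when the key is absent).
import Mathlib
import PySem

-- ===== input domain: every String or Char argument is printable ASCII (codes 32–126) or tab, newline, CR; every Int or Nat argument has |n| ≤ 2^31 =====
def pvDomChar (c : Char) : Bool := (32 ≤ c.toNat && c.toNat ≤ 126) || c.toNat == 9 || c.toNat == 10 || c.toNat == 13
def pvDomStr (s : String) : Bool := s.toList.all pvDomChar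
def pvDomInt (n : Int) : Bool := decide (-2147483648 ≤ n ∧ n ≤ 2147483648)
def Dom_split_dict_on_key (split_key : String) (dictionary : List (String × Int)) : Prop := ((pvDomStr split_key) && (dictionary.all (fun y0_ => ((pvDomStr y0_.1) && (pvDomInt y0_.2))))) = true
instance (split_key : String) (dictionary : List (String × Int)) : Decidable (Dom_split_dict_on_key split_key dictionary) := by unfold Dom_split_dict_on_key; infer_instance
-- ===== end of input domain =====

-- B replaces A's flag-driven single pass with find-first-index-of-key then take/drop at that index (simpler decomposition; same O(n)).


-- ===== PORT A =====
-- A iterates over list(dictionary.keys()) with a found_split_key flag, assigning dictionary[key]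
-- into dict1 or dict2.  For a Python dict (distinct keys, insertion order) iterating the keys and
-- looking each one up is exactly iterating the (key, value) pairs in order, so the loop runs over
-- the association-list pairs; the flag and the two accumulating dicts are carried as foldl state.
-- One loop-body iteration of A: (dict1, dict2, found_split_key) is the state, kv the current pair.
def stepA (split_key : String) (st : List (String × Int) × List (String × Int) × Bool)
    (kv : String × Int) : List (String × Int) × List (String × Int) × Bool :=
  let found := st.2.2 || (kv.1 == split_key)   -- if key == split_key: found_split_key = True
  if found then (st.1, st.2.1 ++ [kv], found)  -- dict2[key] = dictionary[key]
  else (st.1 ++ [kv], st.2.1, found)           -- dict1[key] = dictionary[key]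

def split_dict_on_key (split_key : String) (dictionary : List (String × Int)) : (List (String × Int)) × (List (String × Int)) :=
  let r := dictionary.foldl (stepA split_key) ([], [], false)
  (r.1, r.2.1)

-- ===== PORT B =====
-- Source B: items = list(dictionary.items()); i = next((j for j,(k,_) in enumerate(items) if k == split_key), len(items));
-- return dict(items[:i]), dict(items[i:]).  List.findIdx returns the length when no pair matches,
-- exactly next(..., len(items)).
def split_dict_on_key_alt (split_key : String) (dictionary : List (String × Int)) : (List (String × Int)) × (List (String × Int)) :=
  let items := dictionary
  let i := List.findIdx (fun kv => kv.1 == split_key) items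
  (items.take i, items.drop i)

-- ===== PRECONDITION & SPEC =====
def Spec_split_dict_on_key (split_key : String) (dictionary : List (String × Int)) (out : (List (String × Int)) × (List (String × Int))) : Prop := out = split_dict_on_key_alt split_key dictionary
instance (split_key : String) (dictionary : List (String × Int)) (out : (List (String × Int)) × (List (String × Int))) : Decidable (Spec_split_dict_on_key split_key dictionary out) := by unfold Spec_split_dict_on_key; infer_instance

-- ===== CLAIM (what is proved, stated in full; the proofs are below) =====
def Claim_equal_split_dict_on_key : Prop := ∀ (split_key : String) (dictionary : List (String × Int)), Dom_split_dict_on_key split_key dictionary → Spec_split_dict_on_key split_key dictionary (split_dict_on_key split_key dictionary)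

-- ===== LEMMAS AND PROOFS =====

theorem stepA_true (split_key : String) (d1 d2 : List (String × Int)) (kv : String × Int) :
    stepA split_key (d1, d2, true) kv = (d1, d2 ++ [kv], true) := rfl

theorem stepA_false (split_key : String) (d1 d2 : List (String × Int)) (kv : String × Int) :
    stepA split_key (d1, d2, false) kv =
      if kv.1 == split_key then (d1, d2 ++ [kv], true) else (d1 ++ [kv], d2, false) := by
  unfold stepA
  by_cases h : kv.1 == split_key <;> simp [h]

-- Once the flag is true, every remaining pair is appended to dict2.
theorem splitLoopA_true (split_key : String) (l : List (String × Int))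
    (d1 d2 : List (String × Int)) :
    l.foldl (stepA split_key) (d1, d2, true) = (d1, d2 ++ l, true) := by
  induction l generalizing d2 with
  | nil => simp
  | cons kv t ih => rw [List.foldl_cons, stepA_true, ih]; simp

-- With the flag still false, the loop splits the rest at the first matching pair.
theorem splitLoopA_false (split_key : String) (l : List (String × Int))
    (d1 : List (String × Int)) :
    l.foldl (stepA split_key) (d1, [], false) =
    (d1 ++ l.take (List.findIdx (fun kv => kv.1 == split_key) l),
     l.drop (List.findIdx (fun kv => kv.1 == split_key) l),
     l.any (fun kv => kv.1 == split_key)) := by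
  induction l generalizing d1 with
  | nil => simp
  | cons kv t ih =>
    rw [List.foldl_cons, stepA_false]
    by_cases h : kv.1 == split_key
    · simp [h, splitLoopA_true, List.findIdx_cons]
    · simp [h, ih (d1 ++ [kv]), List.findIdx_cons]

-- ===== VERDICT (by name: the statement is the Claim_ definition above) =====
theorem split_dict_on_key_spec : Claim_equal_split_dict_on_key := by
  intro split_key dictionary _
  unfold Spec_split_dict_on_key split_dict_on_key split_dict_on_key_alt
  rw [splitLoopA_false]
  simp
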